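-- pv_equiv track=rewrite | github.com/llvm/llvm-project | lat5150drvmil/99-archive/database/analysis/query_analyzer.py | _find_sequential_patterns
-- ===== SOURCE A (Python) =====
-- from typing import Dict, List, Optional, Any, Tuple, Union
--
-- def _find_sequential_patterns(test_results: List) -> List:
--     """Find sequential success patterns"""
--     sequential = []
--     current_streak = []
--
--     for test in test_results:
--         if test['success']:
--             current_streak.append(test)
--         else:
--             if len(current_streak) >= 3:
--                 sequential.extend(current_streak)
--             current_streak = []
--
--     if len(current_streak) >= 3:
--         sequential.extend(current_streak)
--
--     return sequential
-- ===== SOURCE B (Python) =====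
-- def _find_sequential_patterns(test_results):
--     """Find sequential success patterns: scan with two indices, taking each
--     maximal run of successes at once and emitting it iff its length >= 3."""
--     sequential = []
--     i = 0
--     n = len(test_results)
--     while i < n:
--         if test_results[i]['success']:
--             j = i
--             while j < n and test_results[j]['success']:
--                 j += 1
--             if j - i >= 3:
--                 sequential.extend(test_results[i:j])
--             i = j
--         else:
--             i += 1
--     return sequential
-- ===== Notes on version B (the rewrite author's own statement) =====
-- stated objective: alternative
-- what changed: Replaces the streak-buffer accumulator with flush-on-failure (and a trailing flush after the loop) by a two-index run scan: each maximal run of successes is taken in one inner advance and emitted immediately iff its length is >= 3.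
import Mathlib
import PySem

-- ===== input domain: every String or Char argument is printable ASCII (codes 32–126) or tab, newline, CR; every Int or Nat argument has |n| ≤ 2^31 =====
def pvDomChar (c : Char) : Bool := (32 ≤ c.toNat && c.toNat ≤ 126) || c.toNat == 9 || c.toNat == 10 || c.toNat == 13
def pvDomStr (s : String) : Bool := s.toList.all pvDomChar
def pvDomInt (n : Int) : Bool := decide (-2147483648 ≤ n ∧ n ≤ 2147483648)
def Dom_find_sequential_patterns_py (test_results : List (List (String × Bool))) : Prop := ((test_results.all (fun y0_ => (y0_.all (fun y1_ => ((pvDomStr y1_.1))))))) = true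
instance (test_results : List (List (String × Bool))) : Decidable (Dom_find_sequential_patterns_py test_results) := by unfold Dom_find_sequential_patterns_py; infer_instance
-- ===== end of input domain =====

-- B replaces A's streak-buffer with flush-on-failure (plus trailing flush) by a two-index run scan
-- that takes each maximal success run at once and emits it iff its length >= 3; same O(n) cost.


-- test['success'] : first-match lookup in the dict-as-association-list; exact under
-- Pre_find_sequential_patterns_py, which guarantees the key is present (else Python raises KeyError).
def pvSucc (t : List (String × Bool)) : Bool := (t.lookup "success").getD false

-- ===== PORT A =====
-- the for-loop of A over (sequential, current_streak)
def pvLoopA : List (List (String × Bool)) → List (List (String × Bool)) → List (List (String × Bool)) → (List (List (String × Bool)) × List (List (String × Bool)))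
  | [], seq, cur => (seq, cur)
  | t :: rest, seq, cur =>
    if pvSucc t then pvLoopA rest seq (cur ++ [t])
    else if 3 ≤ cur.length then pvLoopA rest (seq ++ cur) []
    else pvLoopA rest seq []

def find_sequential_patterns_py (test_results : List (List (String × Bool))) : List (List (String × Bool)) :=
  let st := pvLoopA test_results [] []
  if 3 ≤ st.2.length then st.1 ++ st.2 else st.1

-- ===== PORT B =====
-- Source B's outer while: on a success, the inner 'while j < n and …; j += 1' plus the slice
-- test_results[i:j] take the maximal success run (takeWhile), and i = j skips past it (dropWhile).
def pvScanB : List (List (String × Bool)) → List (List (String × Bool))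
  | [] => []
  | t :: rest =>
    if pvSucc t then
      let run := t :: rest.takeWhile pvSucc
      (if 3 ≤ run.length then run else []) ++ pvScanB (rest.dropWhile pvSucc)
    else pvScanB rest
termination_by l => l.length
decreasing_by
  · have := List.length_dropWhile_le pvSucc rest; simp; omega
  · simp

def find_sequential_patterns_py_alt (test_results : List (List (String × Bool))) : List (List (String × Bool)) :=
  pvScanB test_results

-- ===== PRECONDITION & SPEC =====
-- Pre_: every test dict has the key 'success'; on a dict without it Python A raises KeyError.
def Pre_find_sequential_patterns_py (test_results : List (List (String × Bool))) : Prop :=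
  ∀ t ∈ test_results, (t.lookup "success").isSome = true
instance (test_results : List (List (String × Bool))) : Decidable (Pre_find_sequential_patterns_py test_results) := by unfold Pre_find_sequential_patterns_py; infer_instance

def pvWitness_find_sequential_patterns_py : (List (List (String × Bool))) :=
  [[("success", true)], [("success", true)], [("success", true)], [("success", false)]]

def Spec_find_sequential_patterns_py (test_results : List (List (String × Bool))) (out : List (List (String × Bool))) : Prop := out = find_sequential_patterns_py_alt test_results
instance (test_results : List (List (String × Bool))) (out : List (List (String × Bool))) : Decidable (Spec_find_sequential_patterns_py test_results out) := by unfold Spec_find_sequential_patterns_py; infer_instance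

-- ===== CLAIM (what is proved, stated in full; the proofs are below) =====
def Claim_equal_find_sequential_patterns_py : Prop := ∀ (test_results : List (List (String × Bool))), Dom_find_sequential_patterns_py test_results → Pre_find_sequential_patterns_py test_results → Spec_find_sequential_patterns_py test_results (find_sequential_patterns_py test_results)

-- ===== LEMMAS AND PROOFS =====

theorem pvScanB_all_true (cur : List (List (String × Bool)))
    (h : ∀ x ∈ cur, pvSucc x = true) :
    pvScanB cur = if 3 ≤ cur.length then cur else [] := by
  cases cur with
  | nil => simp [pvScanB]
  | cons a cur' =>
    have ha : pvSucc a = true := h a (by simp)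
    have ht : cur'.takeWhile pvSucc = cur' :=
      List.takeWhile_eq_self_iff.mpr (fun x hx => h x (by simp [hx]))
    have hd : cur'.dropWhile pvSucc = [] :=
      List.dropWhile_eq_nil_iff.mpr (fun x hx => h x (by simp [hx]))
    rw [pvScanB]
    simp [ha, ht, hd, pvScanB]

theorem takeWhile_all_append (l1 : List (List (String × Bool))) (t : List (String × Bool))
    (l2 : List (List (String × Bool)))
    (h : ∀ x ∈ l1, pvSucc x = true) (hf : pvSucc t = false) :
    (l1 ++ t :: l2).takeWhile pvSucc = l1 := by
  induction l1 with
  | nil => simp [hf]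
  | cons b cb ih =>
    have hb : pvSucc b = true := h b (by simp)
    simp [hb, ih (fun x hx => h x (by simp [hx]))]

theorem dropWhile_all_append (l1 : List (List (String × Bool))) (t : List (String × Bool))
    (l2 : List (List (String × Bool)))
    (h : ∀ x ∈ l1, pvSucc x = true) (hf : pvSucc t = false) :
    (l1 ++ t :: l2).dropWhile pvSucc = t :: l2 := by
  induction l1 with
  | nil => simp [hf]
  | cons b cb ih =>
    have hb : pvSucc b = true := h b (by simp)
    simp [hb, ih (fun x hx => h x (by simp [hx]))]

theorem pvScanB_false (t : List (String × Bool)) (rest : List (List (String × Bool)))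
    (hf : pvSucc t = false) : pvScanB (t :: rest) = pvScanB rest := by
  rw [pvScanB.eq_def]; simp [hf]

theorem pvScanB_block (cur : List (List (String × Bool))) (t : List (String × Bool))
    (rest : List (List (String × Bool)))
    (h : ∀ x ∈ cur, pvSucc x = true) (hf : pvSucc t = false) :
    pvScanB (cur ++ t :: rest) = (if 3 ≤ cur.length then cur else []) ++ pvScanB rest := by
  cases cur with
  | nil => simp [pvScanB_false t rest hf]
  | cons a cur' =>
    have ha : pvSucc a = true := h a (by simp)
    have ht := takeWhile_all_append cur' t rest (fun x hx => h x (by simp [hx])) hf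
    have hd := dropWhile_all_append cur' t rest (fun x hx => h x (by simp [hx])) hf
    rw [List.cons_append, pvScanB.eq_def]
    simp [ha, ht, hd, pvScanB_false t rest hf]

theorem pvLoopA_scan (rest : List (List (String × Bool))) :
    ∀ seq cur, (∀ x ∈ cur, pvSucc x = true) →
      (if 3 ≤ (pvLoopA rest seq cur).2.length
       then (pvLoopA rest seq cur).1 ++ (pvLoopA rest seq cur).2
       else (pvLoopA rest seq cur).1) = seq ++ pvScanB (cur ++ rest) := by
  induction rest with
  | nil =>
    intro seq cur h
    rw [List.append_nil, pvScanB_all_true cur h]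
    simp [pvLoopA]
    split <;> simp
  | cons t rest' ih =>
    intro seq cur h
    by_cases hs : pvSucc t = true
    · rw [pvLoopA]
      simp only [hs, if_true]
      have := ih seq (cur ++ [t]) (by
        intro x hx; rcases List.mem_append.mp hx with h1 | h1
        · exact h x h1
        · simp at h1; subst h1; exact hs)
      rw [this, List.append_assoc]; rfl
    · have hf : pvSucc t = false := by simpa using hs
      rw [pvLoopA]
      simp only [hf, Bool.false_eq_true, if_false]
      rw [pvScanB_block cur t rest' h hf]
      by_cases h3 : 3 ≤ cur.length
      · simp only [h3, if_true]
        rw [ih (seq ++ cur) [] (by simp), List.nil_append, List.append_assoc]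
      · simp only [h3, if_false]
        rw [ih seq [] (by simp), List.nil_append]
        simp

-- ===== VERDICT (by name: the statement is the Claim_ definition above) =====
theorem find_sequential_patterns_py_spec : Claim_equal_find_sequential_patterns_py := by
  intro trs _ _
  unfold Spec_find_sequential_patterns_py find_sequential_patterns_py find_sequential_patterns_py_alt
  have := pvLoopA_scan trs [] [] (by simp)
  simpa using this
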